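-- pv_equiv track=rewrite | github.com/m4rquee/mc102 | lab16/lab16.py | pagsResposta
-- ===== SOURCE A (Python) =====
-- def pagsResposta(paginas, termosBusca):
--     ret = []
--     for pag in paginas:
--         pag = pag.split()
--         val = True
--         for term in termosBusca:
--             if term not in pag:
--                 val = False
--                 break
--         ret.append(val)
--
--     return ret
-- ===== SOURCE B (Python) =====
-- def pagsResposta(paginas, termosBusca):
--     words = [set(p.split()) for p in paginas]
--     mask = [True for _ in paginas]
--     for term in termosBusca:
--         mask = [m and (term in w) for m, w in zip(mask, words)]
--     return mask
-- ===== Notes on version B (the rewrite author's own statement) =====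
-- stated objective: alternative
-- what changed: B interchanges the loops: it pre-splits every page into a word set once, then sweeps term by term, AND-ing a boolean mask over all pages, instead of A's per-page scan over all terms with early break.
import Mathlib
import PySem

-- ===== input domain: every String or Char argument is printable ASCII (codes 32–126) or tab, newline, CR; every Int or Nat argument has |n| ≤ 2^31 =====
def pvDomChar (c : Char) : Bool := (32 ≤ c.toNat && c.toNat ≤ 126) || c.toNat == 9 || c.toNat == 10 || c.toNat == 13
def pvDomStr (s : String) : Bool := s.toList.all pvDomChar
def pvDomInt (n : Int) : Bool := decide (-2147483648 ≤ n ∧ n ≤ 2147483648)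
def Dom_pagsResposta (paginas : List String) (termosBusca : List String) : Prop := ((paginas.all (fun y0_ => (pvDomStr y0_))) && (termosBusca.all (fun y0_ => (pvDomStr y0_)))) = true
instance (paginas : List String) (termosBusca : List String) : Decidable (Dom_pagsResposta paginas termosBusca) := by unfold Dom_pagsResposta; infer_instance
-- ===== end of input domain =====

-- B interchanges the loops: pages are pre-split into word sets once, then each term AND-s a boolean mask over all pages (alternative decomposition; same cost class).

-- ===== PORT A =====
-- inner 'for term in termosBusca: if term not in pag: val = False; break'
def pagsRespostaInner (pag : List String) : List String → Bool
  | [] => true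
  | term :: ts => if ¬ pag.contains term then false else pagsRespostaInner pag ts

def pagsResposta (paginas : List String) (termosBusca : List String) : List Bool :=
  paginas.foldl (fun ret pag =>
    ret ++ [pagsRespostaInner (PySem.Str.split₀ pag) termosBusca]) []

-- ===== PORT B =====
def pagsResposta_alt (paginas : List String) (termosBusca : List String) : List Bool :=
  let words := paginas.map (fun p => PySem.Set.ofList (PySem.Str.split₀ p))
  let mask := paginas.map (fun _ => true)
  termosBusca.foldl (fun mask term =>
    (mask.zip words).map (fun mw => mw.1 && PySem.Set.contains mw.2 term)) mask

-- ===== PRECONDITION & SPEC =====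
def Spec_pagsResposta (paginas : List String) (termosBusca : List String) (out : List Bool) : Prop := out = pagsResposta_alt paginas termosBusca
instance (paginas : List String) (termosBusca : List String) (out : List Bool) : Decidable (Spec_pagsResposta paginas termosBusca out) := by unfold Spec_pagsResposta; infer_instance

-- ===== CLAIM (what is proved, stated in full; the proofs are below) =====
def Claim_equal_pagsResposta : Prop := ∀ (paginas : List String) (termosBusca : List String), Dom_pagsResposta paginas termosBusca → Spec_pagsResposta paginas termosBusca (pagsResposta paginas termosBusca)

-- ===== LEMMAS AND PROOFS =====

theorem pagsRespostaInner_eq (pag : List String) (ts : List String) :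
    pagsRespostaInner pag ts = ts.all (fun t => pag.contains t) := by
  induction ts with
  | nil => rfl
  | cons t ts ih =>
    show (if ¬ pag.contains t then false else pagsRespostaInner pag ts) = _
    rw [List.all_cons, ih]
    cases hc : pag.contains t <;> simp [hc]

theorem foldl_append_map {α β : Type} (l : List α) (f : α → β) (acc : List β) :
    l.foldl (fun r x => r ++ [f x]) acc = acc ++ l.map f := by
  induction l generalizing acc with
  | nil => simp
  | cons x xs ih => simp [List.foldl, ih]

theorem zip_map_self {α : Type} (l : List α) (g : α → Bool) (h : Bool → α → Bool) :
    ((l.map g).zip l).map (fun p => h p.1 p.2) = l.map (fun w => h (g w) w) := by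
  induction l with
  | nil => rfl
  | cons x xs ih => simp [ih]

theorem maskFold_eq {α : Type} (c : String → α → Bool) (l : List α)
    (ts : List String) (g : α → Bool) :
    ts.foldl (fun mask term => (mask.zip l).map (fun mw => mw.1 && c term mw.2)) (l.map g)
      = l.map (fun w => g w && ts.all (fun t => c t w)) := by
  induction ts generalizing g with
  | nil => simp
  | cons t ts ih =>
    simp only [List.foldl]
    rw [zip_map_self l g (fun m w => m && c t w), ih (fun w => g w && c t w)]
    simp [Bool.and_assoc]


-- ===== VERDICT (by name: the statement is the Claim_ definition above) =====
theorem pagsResposta_spec : Claim_equal_pagsResposta := by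
  intro paginas termosBusca _
  unfold Spec_pagsResposta pagsResposta pagsResposta_alt
  rw [foldl_append_map]
  have hmask : paginas.map (fun _ => true)
      = (paginas.map (fun p => PySem.Set.ofList (PySem.Str.split₀ p))).map (fun _ => true) := by
    simp
  simp only [hmask]
  rw [maskFold_eq (fun term w => PySem.Set.contains w term)
      (paginas.map (fun p => PySem.Set.ofList (PySem.Str.split₀ p))) termosBusca (fun _ => true)]
  simp [pagsRespostaInner_eq]
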